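-- pv_equiv track=rewrite | github.com/pypi-data/pypi-mirror-403 | packages/cr-proc/cr_proc-0.1.10.tar.gz/cr_proc-0.1.10/src/code_recorder_processor/api/build.py | _apply_event_fuzzy_text
-- ===== SOURCE A (Python) =====
-- def _apply_event_exact_text(doc: str, offset: int, old: str, new: str) -> str:
--     """Apply an event assuming Python string indices (Unicode code points)."""
--     return doc[:offset] + new + doc[offset + len(old):]
--
-- def _apply_event_fuzzy_text(doc: str, offset: int, old: str, new: str, window: int) -> str:
--     """
--     Apply an event with a fuzzy fallback in Python string space:
--     - If old == '', it's a pure insertion at offset (clamped).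
--     - If exact match fails, search for old around the offset within ±window chars and
--       replace the nearest occurrence.
--     """
--     if old == "":
--         off = max(0, min(offset, len(doc)))
--         return doc[:off] + new + doc[off:]
--
--     # Try exact match first
--     if doc[offset:offset + len(old)] == old:
--         return _apply_event_exact_text(doc, offset, old, new)
--
--     # Fuzzy search around the offset
--     start = max(0, offset - window)
--     end = min(len(doc), offset + window)
--     best_pos, best_dist = None, None
--
--     i = start
--     while True:
--         i = doc.find(old, i, end)
--         if i == -1:
--             break
--         dist = abs(i - offset)
--         if best_dist is None or dist < best_dist:
--             best_pos, best_dist = i, dist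
--         i += 1
--
--     if best_pos is not None:
--         return _apply_event_exact_text(doc, best_pos, old, new)
--
--     raise ValueError(
--         f"Old fragment not found near offset {offset}.\nold={old!r}\nnew={new!r}"
--     )
-- ===== SOURCE B (Python) =====
-- def _apply_event_exact_text(doc: str, offset: int, old: str, new: str) -> str:
--     return doc[:offset] + new + doc[offset + len(old):]
--
--
-- def _apply_event_fuzzy_text(doc: str, offset: int, old: str, new: str, window: int) -> str:
--     if old == "":
--         off = max(0, min(offset, len(doc)))
--         return doc[:off] + new + doc[off:]
--     if doc[offset:offset + len(old)] == old:
--         return _apply_event_exact_text(doc, offset, old, new)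
--     # Fuzzy: instead of scanning every occurrence, take the nearest occurrence on
--     # each side of the offset with one rfind and one find, then pick the closer
--     # (ties go to the left/lower index, like the original's first-minimum scan).
--     start = max(0, offset - window)
--     end = max(0, min(len(doc), offset + window))
--     mid = max(start, min(offset, end))
--     left = doc.rfind(old, start, min(end, mid + len(old)))
--     right = doc.find(old, mid, end)
--     if left == -1 and right == -1:
--         raise ValueError(
--             f"Old fragment not found near offset {offset}.\nold={old!r}\nnew={new!r}"
--         )
--     best_pos = left if (right == -1 or (left != -1 and offset - left <= right - offset)) else right
--     return _apply_event_exact_text(doc, best_pos, old, new)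
-- ===== Notes on version B (the rewrite author's own statement) =====
-- stated objective: faster
-- what changed: The fuzzy branch no longer scans every occurrence of old in the window with a repeated-find loop; it asks rfind for the nearest occurrence at or left of the (clamped) offset and find for the nearest one to its right, and picks the closer of the two candidates (ties to the left), which is the same nearest-leftmost occurrence the scan selects.
-- outside the precondition, e.g. on _apply_event_fuzzy_text('abcab', -2, 'ab', 'X', -1): A returns 'Xcab', B raises ValueError
import Mathlib
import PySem

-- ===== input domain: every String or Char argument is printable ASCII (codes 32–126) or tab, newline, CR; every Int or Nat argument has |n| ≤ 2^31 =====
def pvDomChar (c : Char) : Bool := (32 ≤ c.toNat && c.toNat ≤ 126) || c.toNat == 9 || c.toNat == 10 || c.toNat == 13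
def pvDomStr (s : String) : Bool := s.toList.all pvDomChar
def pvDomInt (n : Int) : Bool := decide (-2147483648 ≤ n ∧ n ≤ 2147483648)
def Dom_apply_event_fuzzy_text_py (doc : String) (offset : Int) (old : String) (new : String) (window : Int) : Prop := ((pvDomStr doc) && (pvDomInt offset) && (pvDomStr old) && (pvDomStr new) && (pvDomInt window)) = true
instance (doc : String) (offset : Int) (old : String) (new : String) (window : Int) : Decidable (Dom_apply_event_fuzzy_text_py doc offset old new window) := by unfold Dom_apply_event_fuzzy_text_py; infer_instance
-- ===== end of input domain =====

-- B replaces A's scan over every occurrence of `old` in the window by one rfind (nearest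
-- occurrence at or left of the clamped offset) plus one find (nearest to its right) and
-- picks the closer candidate, ties to the left; return values agree on Pre_.

-- ===== PORT A =====

-- `doc[:offset] + new + doc[offset+len(old):]` (helper _apply_event_exact_text, shared verbatim by A and B)
def pvExactApply (doc : String) (offset : Int) (old : String) (new : String) : String :=
  PySem.Str.slice doc none (some offset) ++ new ++ PySem.Str.slice doc (some (offset + PySem.Str.len old)) none

-- the `while True: i = doc.find(old, i, end) …` loop of A, state = (best_pos, best_dist);
-- fuel = (len(doc) + 1 - i) bounds the iteration count (i grows by ≥ 1 per round), so the
-- 0-fuel arm is never reached at the call below: it only makes the recursion structural.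
def pvFuzzyLoop (doc old : String) (e offset : Int) (fuel : ℕ) (i : Int) (bp bd : Option Int) : Option Int :=
  match fuel with
  | 0 => bp
  | fuel + 1 =>
    if PySem.Str.findFrom doc old i (some e) = -1 then bp
    else
      match bd with
      | none =>
          pvFuzzyLoop doc old e offset fuel (PySem.Str.findFrom doc old i (some e) + 1)
            (some (PySem.Str.findFrom doc old i (some e)))
            (some |PySem.Str.findFrom doc old i (some e) - offset|)
      | some b =>
          if |PySem.Str.findFrom doc old i (some e) - offset| < b then
            pvFuzzyLoop doc old e offset fuel (PySem.Str.findFrom doc old i (some e) + 1)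
              (some (PySem.Str.findFrom doc old i (some e)))
              (some |PySem.Str.findFrom doc old i (some e) - offset|)
          else
            pvFuzzyLoop doc old e offset fuel (PySem.Str.findFrom doc old i (some e) + 1) bp bd

def apply_event_fuzzy_text_py (doc : String) (offset : Int) (old : String) (new : String) (window : Int) : String :=
  if old = "" then
    PySem.Str.slice doc none (some (max 0 (min offset (PySem.Str.len doc)))) ++ new ++
      PySem.Str.slice doc (some (max 0 (min offset (PySem.Str.len doc)))) none
  else if PySem.Str.slice doc (some offset) (some (offset + PySem.Str.len old)) = old then
    pvExactApply doc offset old new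
  else
    match pvFuzzyLoop doc old (min (PySem.Str.len doc) (offset + window)) offset
        ((PySem.Str.len doc + 1 - max 0 (offset - window)).toNat)
        (max 0 (offset - window)) none none with
    | some bp => pvExactApply doc bp old new
    | none => ""   -- Python raises ValueError here; excluded by Pre_

-- ===== PORT B =====

def apply_event_fuzzy_text_py_alt (doc : String) (offset : Int) (old : String) (new : String) (window : Int) : String :=
  if old = "" then
    PySem.Str.slice doc none (some (max 0 (min offset (PySem.Str.len doc)))) ++ new ++
      PySem.Str.slice doc (some (max 0 (min offset (PySem.Str.len doc)))) none
  else if PySem.Str.slice doc (some offset) (some (offset + PySem.Str.len old)) = old then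
    pvExactApply doc offset old new
  else
    let start := max 0 (offset - window)
    let stop := max 0 (min (PySem.Str.len doc) (offset + window))
    let mid := max start (min offset stop)
    let left := PySem.Str.rfindFrom doc old start (some (min stop (mid + PySem.Str.len old)))
    let right := PySem.Str.findFrom doc old mid (some stop)
    if left = -1 ∧ right = -1 then ""   -- Python raises ValueError here; excluded by Pre_
    else
      pvExactApply doc
        (if right = -1 ∨ (¬ left = -1 ∧ offset - left ≤ right - offset) then left else right)
        old new

-- ===== PRECONDITION & SPEC =====

-- Pre_ excludes the fuzzy-branch inputs on which A raises ValueError (old not found in the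
-- window) and the fuzzy-branch inputs with offset+window < 0, where str.find's negative end
-- bound wraps to near the end of the document, so a value A returns there is a
-- negative-index wraparound accident (B raises ValueError there).
def Pre_apply_event_fuzzy_text_py (doc : String) (offset : Int) (old : String) (new : String) (window : Int) : Prop :=
  old = "" ∨
  PySem.Str.slice doc (some offset) (some (offset + PySem.Str.len old)) = old ∨
  (0 ≤ offset + window ∧
    PySem.Str.isIn old (PySem.Str.slice doc (some (max 0 (offset - window)))
      (some (min (PySem.Str.len doc) (offset + window)))) = true)

instance (doc : String) (offset : Int) (old : String) (new : String) (window : Int) : Decidable (Pre_apply_event_fuzzy_text_py doc offset old new window) := by unfold Pre_apply_event_fuzzy_text_py; infer_instance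

def pvWitness_apply_event_fuzzy_text_py : String × Int × String × String × Int := ("abcdef", 1, "cd", "XY", 3)

def Spec_apply_event_fuzzy_text_py (doc : String) (offset : Int) (old : String) (new : String) (window : Int) (out : String) : Prop := out = apply_event_fuzzy_text_py_alt doc offset old new window
instance (doc : String) (offset : Int) (old : String) (new : String) (window : Int) (out : String) : Decidable (Spec_apply_event_fuzzy_text_py doc offset old new window out) := by unfold Spec_apply_event_fuzzy_text_py; infer_instance

-- ===== CLAIM (what is proved, stated in full; the proofs are below) =====
def Claim_equal_apply_event_fuzzy_text_py : Prop := ∀ (doc : String) (offset : Int) (old : String) (new : String) (window : Int), Dom_apply_event_fuzzy_text_py doc offset old new window → Pre_apply_event_fuzzy_text_py doc offset old new window → Spec_apply_event_fuzzy_text_py doc offset old new window (apply_event_fuzzy_text_py doc offset old new window)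

-- ===== LEMMAS AND PROOFS =====

theorem pvWitness_ok :
    Dom_apply_event_fuzzy_text_py (pvWitness_apply_event_fuzzy_text_py.1) (pvWitness_apply_event_fuzzy_text_py.2.1) (pvWitness_apply_event_fuzzy_text_py.2.2.1) (pvWitness_apply_event_fuzzy_text_py.2.2.2.1) (pvWitness_apply_event_fuzzy_text_py.2.2.2.2) ∧
    Pre_apply_event_fuzzy_text_py (pvWitness_apply_event_fuzzy_text_py.1) (pvWitness_apply_event_fuzzy_text_py.2.1) (pvWitness_apply_event_fuzzy_text_py.2.2.1) (pvWitness_apply_event_fuzzy_text_py.2.2.2.1) (pvWitness_apply_event_fuzzy_text_py.2.2.2.2) := by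
  decide

-- distance to the offset
def pvD (offset : Int) (k : ℕ) : Int := |(k : Int) - offset|

-- one update step of A's best_pos/best_dist accumulator
def pvStep (offset : Int) (acc : Option Int × Option Int) (k : ℕ) : Option Int × Option Int :=
  match acc.2 with
  | none => (some (k : Int), some (pvD offset k))
  | some b => if pvD offset k < b then (some (k : Int), some (pvD offset k)) else acc

-- the ascending list of occurrence positions of ol in dl that lie in [i, eI - len ol]
def pvOccs (dl ol : List Char) (eI : Int) (i : Int) : List ℕ :=
  (List.range (dl.length + 1)).filter
    (fun k => decide (i ≤ (k : Int)) && decide ((k : Int) + ol.length ≤ eI) && ol.isPrefixOf (dl.drop k))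

theorem pvMem_occs (dl ol : List Char) (eI : Int) (i : Int) (hL : 1 ≤ ol.length)
    (hen : eI ≤ (dl.length : Int)) (k : ℕ) :
    k ∈ pvOccs dl ol eI i ↔ (i ≤ (k : Int) ∧ (k : Int) + ol.length ≤ eI ∧ ol <+: dl.drop k) := by
  simp only [pvOccs, List.mem_filter, List.mem_range, Bool.and_eq_true, decide_eq_true_eq,
    List.isPrefixOf_iff_prefix]
  constructor
  · rintro ⟨-, ⟨h1, h2⟩, h3⟩; exact ⟨h1, h2, h3⟩
  · rintro ⟨h1, h2, h3⟩; exact ⟨by omega, ⟨h1, h2⟩, h3⟩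

theorem pvOccs_sorted (dl ol : List Char) (eI : Int) (i : Int) :
    (pvOccs dl ol eI i).Pairwise (· < ·) := by
  exact List.Pairwise.sublist List.filter_sublist List.pairwise_lt_range

theorem pvPrefixTake (s u : List Char) (t : ℕ) :
    s <+: u.take t ↔ s <+: u ∧ s.length ≤ t := by
  constructor
  · intro h
    have hl := h.length_le
    simp only [List.length_take] at hl
    exact ⟨h.trans (List.take_prefix t u), le_trans hl (min_le_left _ _)⟩
  · rintro ⟨h, hlt⟩
    rw [List.prefix_iff_eq_take] at h ⊢
    rw [List.take_take, min_eq_left hlt]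
    exact h

theorem pvRegionPrefix (d sub : List Char) (hsub : sub ≠ []) (a t m : ℕ) :
    sub <+: ((d.take t).drop a).drop m ↔ (sub <+: d.drop (a + m) ∧ (a + m) + sub.length ≤ t) := by
  have hL : 1 ≤ sub.length := List.length_pos_iff.mpr hsub
  rw [List.drop_drop, List.drop_take, pvPrefixTake]
  constructor
  · rintro ⟨h1, h2⟩; exact ⟨h1, by omega⟩
  · rintro ⟨h1, h2⟩; exact ⟨h1, by omega⟩

theorem pvFF_norm (d sub : List Char) (i e : Int) (hi : 0 ≤ i) (he : 0 ≤ e)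
    (hen : e ≤ (d.length : Int)) :
    PySem.Chars.findFrom d sub i (some e) =
      if e < i then -1
      else if PySem.Chars.find (List.drop i.toNat (List.take e.toNat d)) sub = -1 then -1
      else i + PySem.Chars.find (List.drop i.toNat (List.take e.toNat d)) sub := by
  simp only [PySem.Chars.findFrom]
  have h1 : (if (d.length : Int) < e then (d.length : Int) else if e < 0 then if e + d.length < 0 then 0 else e + d.length else e) = e := by
    split_ifs <;> omega
  have h2 : (if i < 0 then if i + (d.length : Int) < 0 then 0 else i + d.length else i) = i := by
    split_ifs <;> omega
  rw [h1, h2]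

theorem pvInfixRegion (d sub : List Char) (hsub : sub ≠ []) (i e : ℕ) :
    sub <:+: List.drop i (List.take e d) ↔
      ∃ k : ℕ, i ≤ k ∧ k + sub.length ≤ e ∧ sub <+: d.drop k := by
  rw [← PySem.Chars.isIn_iff_infix, ← PySem.Chars.exists_prefix_drop_iff_isIn]
  constructor
  · rintro ⟨m, hm⟩
    rw [pvRegionPrefix d sub hsub i e m] at hm
    exact ⟨i + m, by omega, by omega, hm.1⟩
  · rintro ⟨k, hk1, hk2, hk3⟩
    refine ⟨k - i, ?_⟩
    rw [pvRegionPrefix d sub hsub i e (k - i)]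
    have : i + (k - i) = k := by omega
    rw [this]
    exact ⟨hk3, by omega⟩

theorem pvFF_neg_one (d sub : List Char) (i e : Int) (hsub : sub ≠ []) (hi : 0 ≤ i)
    (he : 0 ≤ e) (hen : e ≤ (d.length : Int)) :
    PySem.Chars.findFrom d sub i (some e) = -1 ↔
      ∀ k : ℕ, i ≤ (k : Int) → (k : Int) + sub.length ≤ e → ¬ sub <+: d.drop k := by
  have hL : 1 ≤ sub.length := List.length_pos_iff.mpr hsub
  rw [pvFF_norm d sub i e hi he hen]
  by_cases hg : e < i
  · rw [if_pos hg]
    constructor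
    · intro _ k hk1 hk2 _; omega
    · intro _; rfl
  · rw [if_neg hg]
    by_cases hr : PySem.Chars.find (List.drop i.toNat (List.take e.toNat d)) sub = -1
    · rw [if_pos hr]
      rw [PySem.Chars.find_eq_neg_one_iff, pvInfixRegion d sub hsub i.toNat e.toNat] at hr
      constructor
      · intro _ k hk1 hk2 hk3
        exact hr ⟨k, by omega, by omega, hk3⟩
      · intro _; rfl
    · rw [if_neg hr]
      have hr0 : 0 ≤ PySem.Chars.find (List.drop i.toNat (List.take e.toNat d)) sub := by
        have := PySem.Chars.neg_one_le_find (List.drop i.toNat (List.take e.toNat d)) sub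
        omega
      have hspec := PySem.Chars.find_spec hr0
      constructor
      · intro h; omega
      · intro hall
        exfalso
        have hpre := hspec.1
        rw [pvRegionPrefix d sub hsub] at hpre
        exact hall _ (by omega) (by omega) hpre.1

theorem pvFF_spec (d sub : List Char) (i e : Int) (hsub : sub ≠ []) (hi : 0 ≤ i)
    (he : 0 ≤ e) (hen : e ≤ (d.length : Int))
    (h : PySem.Chars.findFrom d sub i (some e) ≠ -1) :
    ∃ j : ℕ, PySem.Chars.findFrom d sub i (some e) = (j : Int) ∧ i ≤ (j : Int) ∧
      (j : Int) + sub.length ≤ e ∧ sub <+: d.drop j ∧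
      ∀ k : ℕ, i ≤ (k : Int) → k < j → ¬ ((k : Int) + sub.length ≤ e ∧ sub <+: d.drop k) := by
  have hL : 1 ≤ sub.length := List.length_pos_iff.mpr hsub
  rw [pvFF_norm d sub i e hi he hen] at h ⊢
  by_cases hg : e < i
  · rw [if_pos hg] at h; exact absurd rfl h
  · rw [if_neg hg] at h ⊢
    by_cases hr : PySem.Chars.find (List.drop i.toNat (List.take e.toNat d)) sub = -1
    · rw [if_pos hr] at h; exact absurd rfl h
    · rw [if_neg hr] at h ⊢
      have hr0 : 0 ≤ PySem.Chars.find (List.drop i.toNat (List.take e.toNat d)) sub := by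
        have := PySem.Chars.neg_one_le_find (List.drop i.toNat (List.take e.toNat d)) sub
        omega
      obtain ⟨hpre, hmin⟩ := PySem.Chars.find_spec hr0
      rw [pvRegionPrefix d sub hsub] at hpre
      refine ⟨i.toNat + (PySem.Chars.find (List.drop i.toNat (List.take e.toNat d)) sub).toNat,
        by omega, by omega, by omega, hpre.1, ?_⟩
      intro k hk1 hk2 hk3
      have hm : k - i.toNat < (PySem.Chars.find (List.drop i.toNat (List.take e.toNat d)) sub).toNat := by omega
      apply hmin (k - i.toNat) hm
      rw [pvRegionPrefix d sub hsub]
      have : i.toNat + (k - i.toNat) = k := by omega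
      rw [this]
      exact ⟨hk3.2, by omega⟩

theorem pvRfindGo (s sub : List Char) (m : ℕ) :
    (PySem.Chars.rfind.go s sub m = -1 ∧ ∀ j : ℕ, j ≤ m → ¬ sub <+: s.drop j) ∨
    (∃ j : ℕ, PySem.Chars.rfind.go s sub m = (j : Int) ∧ j ≤ m ∧ sub <+: s.drop j ∧
      ∀ k : ℕ, j < k → k ≤ m → ¬ sub <+: s.drop k) := by
  induction m with
  | zero =>
    by_cases h : sub.isPrefixOf s
    · right
      refine ⟨0, ?_, le_refl 0, ?_, ?_⟩
      · simp [PySem.Chars.rfind.go, h]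
      · simpa using List.isPrefixOf_iff_prefix.mp h
      · intro k hk1 hk2 _; omega
    · left
      constructor
      · simp [PySem.Chars.rfind.go, h]
      · intro j hj
        interval_cases j
        simpa using fun hc => h (List.isPrefixOf_iff_prefix.mpr (by simpa using hc))
  | succ j ih =>
    by_cases h : sub.isPrefixOf (s.drop (j+1))
    · right
      refine ⟨j+1, ?_, le_refl _, List.isPrefixOf_iff_prefix.mp h, ?_⟩
      · simp [PySem.Chars.rfind.go, h]
      · intro k hk1 hk2 _; omega
    · have hstep : PySem.Chars.rfind.go s sub (j+1) = PySem.Chars.rfind.go s sub j := by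
        simp [PySem.Chars.rfind.go, h]
      have hnp : ¬ sub <+: s.drop (j+1) := fun hc => h (List.isPrefixOf_iff_prefix.mpr hc)
      rcases ih with ⟨h1, h2⟩ | ⟨j', h1, h2, h3, h4⟩
      · left
        refine ⟨by rw [hstep]; exact h1, ?_⟩
        intro k hk
        rcases Nat.lt_or_ge k (j+1) with hlt | hge
        · exact h2 k (by omega)
        · have : k = j + 1 := by omega
          subst this; exact hnp
      · right
        refine ⟨j', by rw [hstep]; exact h1, by omega, h3, ?_⟩
        intro k hk1 hk2
        rcases Nat.lt_or_ge k (j+1) with hlt | hge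
        · exact h4 k hk1 (by omega)
        · have : k = j + 1 := by omega
          subst this; exact hnp

theorem pvRF_norm (d sub : List Char) (i e : Int) (hi : 0 ≤ i) (he : 0 ≤ e)
    (hen : e ≤ (d.length : Int)) :
    PySem.Chars.rfindFrom d sub i (some e) =
      if e < i then -1
      else if PySem.Chars.rfind (List.drop i.toNat (List.take e.toNat d)) sub = -1 then -1
      else i + PySem.Chars.rfind (List.drop i.toNat (List.take e.toNat d)) sub := by
  simp only [PySem.Chars.rfindFrom]
  have h1 : (if (d.length : Int) < e then (d.length : Int) else if e < 0 then if e + d.length < 0 then 0 else e + d.length else e) = e := by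
    split_ifs <;> omega
  have h2 : (if i < 0 then if i + (d.length : Int) < 0 then 0 else i + d.length else i) = i := by
    split_ifs <;> omega
  rw [h1, h2]

theorem pvRF_neg_one (d sub : List Char) (i e : Int) (hsub : sub ≠ []) (hi : 0 ≤ i)
    (he : 0 ≤ e) (hen : e ≤ (d.length : Int)) :
    PySem.Chars.rfindFrom d sub i (some e) = -1 ↔
      ∀ k : ℕ, i ≤ (k : Int) → (k : Int) + sub.length ≤ e → ¬ sub <+: d.drop k := by
  have hL : 1 ≤ sub.length := List.length_pos_iff.mpr hsub
  rw [pvRF_norm d sub i e hi he hen]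
  by_cases hg : e < i
  · rw [if_pos hg]
    constructor
    · intro _ k hk1 hk2 _; omega
    · intro _; rfl
  · rw [if_neg hg]
    rcases pvRfindGo (List.drop i.toNat (List.take e.toNat d)) sub
        (List.drop i.toNat (List.take e.toNat d)).length with ⟨h1, h2⟩ | ⟨j, h1, h2, h3, h4⟩
    · rw [show PySem.Chars.rfind (List.drop i.toNat (List.take e.toNat d)) sub = -1 from h1, if_pos rfl]
      constructor
      · intro _ k hk1 hk2 hk3
        refine h2 (k - i.toNat) ?_ ?_
        · simp only [List.length_drop, List.length_take]; omega
        · rw [pvRegionPrefix d sub hsub]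
          have : i.toNat + (k - i.toNat) = k := by omega
          rw [this]
          exact ⟨hk3, by omega⟩
      · intro _; rfl
    · have hrf : PySem.Chars.rfind (List.drop i.toNat (List.take e.toNat d)) sub = (j : Int) := h1
      rw [hrf]
      have hprej := h3
      rw [pvRegionPrefix d sub hsub] at hprej
      constructor
      · intro hc
        rw [if_neg (by omega)] at hc
        omega
      · intro hall
        exact absurd hprej.1 (hall (i.toNat + j) (by omega) (by omega))

theorem pvRF_spec (d sub : List Char) (i e : Int) (hsub : sub ≠ []) (hi : 0 ≤ i)
    (he : 0 ≤ e) (hen : e ≤ (d.length : Int))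
    (h : PySem.Chars.rfindFrom d sub i (some e) ≠ -1) :
    ∃ j : ℕ, PySem.Chars.rfindFrom d sub i (some e) = (j : Int) ∧ i ≤ (j : Int) ∧
      (j : Int) + sub.length ≤ e ∧ sub <+: d.drop j ∧
      ∀ k : ℕ, j < k → ¬ (i ≤ (k : Int) ∧ (k : Int) + sub.length ≤ e ∧ sub <+: d.drop k) := by
  have hL : 1 ≤ sub.length := List.length_pos_iff.mpr hsub
  rw [pvRF_norm d sub i e hi he hen] at h ⊢
  by_cases hg : e < i
  · rw [if_pos hg] at h; exact absurd rfl h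
  · rw [if_neg hg] at h ⊢
    rcases pvRfindGo (List.drop i.toNat (List.take e.toNat d)) sub
        (List.drop i.toNat (List.take e.toNat d)).length with ⟨h1, h2⟩ | ⟨j, h1, h2, h3, h4⟩
    · rw [show PySem.Chars.rfind (List.drop i.toNat (List.take e.toNat d)) sub = -1 from h1] at h
      exact absurd (if_pos rfl) h
    · have hrf : PySem.Chars.rfind (List.drop i.toNat (List.take e.toNat d)) sub = (j : Int) := h1
      rw [hrf] at h ⊢
      rw [if_neg (by omega)]
      have hprej := h3
      rw [pvRegionPrefix d sub hsub] at hprej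
      refine ⟨i.toNat + j, by omega, by omega, by omega, hprej.1, ?_⟩
      intro k hk1 hk2
      have hmem : k - i.toNat ≤ (List.drop i.toNat (List.take e.toNat d)).length := by
        have hkl : sub <+: ((List.take e.toNat d).drop i.toNat).drop (k - i.toNat) := by
          rw [pvRegionPrefix d sub hsub]
          have : i.toNat + (k - i.toNat) = k := by omega
          rw [this]
          exact ⟨hk2.2.2, by omega⟩
        have := hkl.length_le
        simp only [List.length_drop] at this ⊢
        omega
      apply h4 (k - i.toNat) (by omega) hmem
      rw [pvRegionPrefix d sub hsub]
      have : i.toNat + (k - i.toNat) = k := by omega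
      rw [this]
      exact ⟨hk2.2.2, by omega⟩

theorem pvFilterCons (p q : ℕ → Bool) (j : ℕ) (l : List ℕ) (hl : l.Pairwise (· < ·))
    (hmem : j ∈ l) (hp : ∀ k, p k = true ↔ (k = j ∨ q k = true)) (hq : ∀ k, q k = true → j < k) :
    l.filter p = j :: l.filter q := by
  induction l with
  | nil => cases hmem
  | cons a t ih =>
    rcases List.pairwise_cons.mp hl with ⟨ha, ht⟩
    by_cases haj : a = j
    · subst haj
      have hqa : q a = false := by
        cases hqa : q a
        · rfl
        · exact absurd (hq a hqa) (lt_irrefl a)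
      rw [List.filter_cons, List.filter_cons, hqa, if_pos (by rw [(hp a)]; exact Or.inl rfl)]
      rw [if_neg (by simp)]
      congr 1
      apply List.filter_congr
      intro k hk
      have := ha k hk
      cases hpk : p k
      · cases hqk : q k
        · rfl
        · exact absurd ((hp k).mpr (Or.inr hqk)) (by simp [hpk])
      · rcases (hp k).mp hpk with rfl | hqk
        · omega
        · exact hqk.symm
    · have hjt : j ∈ t := by
        rcases List.mem_cons.mp hmem with h | h
        · exact absurd h.symm haj
        · exact h
      have hja : a < j := ha j hjt
      have hpa : p a = false := by
        cases hpa : p a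
        · rfl
        · rcases (hp a).mp hpa with rfl | hqa
          · omega
          · have := hq a hqa; omega
      have hqa : q a = false := by
        cases hqa : q a
        · rfl
        · have := hq a hqa; omega
      rw [List.filter_cons, List.filter_cons, hpa, hqa]
      simp only [Bool.false_eq_true, if_false]
      exact ih ht hjt

-- A's loop equals a fold of its update step over the ascending occurrence list
theorem pvLoop_eq_fold (doc old : String) (eI offset : Int)
    (hsub : old.toList ≠ []) (he : 0 ≤ eI) (hen : eI ≤ (doc.toList.length : Int)) :
    ∀ fuel : ℕ, ∀ i : Int, ((doc.toList.length : Int) + 1 - i).toNat ≤ fuel → 0 ≤ i →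
    ∀ bp bd : Option Int,
      pvFuzzyLoop doc old eI offset fuel i bp bd =
        (List.foldl (pvStep offset) (bp, bd) (pvOccs doc.toList old.toList eI i)).1 := by
  have hL : 1 ≤ old.toList.length := List.length_pos_iff.mpr hsub
  intro fuel
  induction fuel with
  | zero =>
    intro i hf hi bp bd
    have hbig : (doc.toList.length : Int) + 1 ≤ i := by omega
    have hocc : pvOccs doc.toList old.toList eI i = [] := by
      unfold pvOccs
      rw [List.filter_eq_nil_iff]
      intro k hk
      rw [List.mem_range] at hk
      simp only [Bool.and_eq_true, decide_eq_true_eq, not_and]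
      intro h1 h2
      omega
    rw [hocc]
    rfl
  | succ f ihf =>
    intro i hf hi bp bd
    by_cases hff : PySem.Str.findFrom doc old i (some eI) = -1
    · show (if PySem.Str.findFrom doc old i (some eI) = -1 then bp
          else _) = _
      rw [if_pos hff]
      have hall := (pvFF_neg_one doc.toList old.toList i eI hsub hi he hen).mp
        (by simpa [PySem.Str.findFrom_eq] using hff)
      have hocc : pvOccs doc.toList old.toList eI i = [] := by
        unfold pvOccs
        rw [List.filter_eq_nil_iff]
        intro k hk
        simp only [Bool.and_eq_true, decide_eq_true_eq, List.isPrefixOf_iff_prefix, not_and]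
        exact fun h12 => hall k h12.1 h12.2
      rw [hocc]
      rfl
    · obtain ⟨j, hj_eq, hj_ge, hj_le, hj_pre, hj_min⟩ :=
        pvFF_spec doc.toList old.toList i eI hsub hi he hen
          (by simpa [PySem.Str.findFrom_eq] using hff)
      have hsf : PySem.Str.findFrom doc old i (some eI) = (j : Int) := by
        rw [PySem.Str.findFrom_eq]; exact hj_eq
      have hocc : pvOccs doc.toList old.toList eI i =
          j :: pvOccs doc.toList old.toList eI ((j : Int) + 1) := by
        unfold pvOccs
        apply pvFilterCons _ _ j _ List.pairwise_lt_range
        · rw [List.mem_range]; omega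
        · intro k
          simp only [Bool.and_eq_true, decide_eq_true_eq, List.isPrefixOf_iff_prefix]
          constructor
          · rintro ⟨⟨h1, h2⟩, h3⟩
            by_cases hkj : k = j
            · exact Or.inl hkj
            · refine Or.inr ⟨⟨?_, h2⟩, h3⟩
              have : ¬ k < j := fun hc => hj_min k h1 hc ⟨h2, h3⟩
              omega
          · rintro (rfl | ⟨⟨h1, h2⟩, h3⟩)
            · exact ⟨⟨hj_ge, by omega⟩, hj_pre⟩
            · exact ⟨⟨by omega, h2⟩, h3⟩
        · intro k
          simp only [Bool.and_eq_true, decide_eq_true_eq]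
          rintro ⟨⟨h1, -⟩, -⟩
          omega
      have hmeas : ((doc.toList.length : Int) + 1 - ((j : Int) + 1)).toNat ≤ f := by omega
      have hj1 : (0 : Int) ≤ (j : Int) + 1 := by omega
      show (if PySem.Str.findFrom doc old i (some eI) = -1 then bp else _) = _
      rw [if_neg hff, hocc, List.foldl_cons]
      cases bd with
      | none =>
        rw [hsf]
        rw [ihf ((j : Int) + 1) hmeas hj1 (some ((j : Int))) (some |(j : Int) - offset|)]
        rfl
      | some b =>
        rw [hsf]
        dsimp only
        by_cases hd : |(j : Int) - offset| < b
        · rw [if_pos hd, ihf ((j : Int) + 1) hmeas hj1 (some ((j : Int))) (some |(j : Int) - offset|)]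
          have : pvStep offset (bp, some b) j = (some ((j : Int)), some |(j : Int) - offset|) := by
            simp [pvStep, pvD, hd]
          rw [this]
        · rw [if_neg hd, ihf ((j : Int) + 1) hmeas hj1 bp (some b)]
          have : pvStep offset (bp, some b) j = (bp, some b) := by
            simp [pvStep, pvD, hd]
          rw [this]

theorem pvFoldNoop (offset : Int) (t : List ℕ) (p b : Int)
    (h : ∀ x ∈ t, ¬ pvD offset x < b) :
    List.foldl (pvStep offset) (some p, some b) t = (some p, some b) := by
  induction t with
  | nil => rfl
  | cons a t' ih =>
    rw [List.foldl_cons]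
    have : pvStep offset (some p, some b) a = (some p, some b) := by
      simp [pvStep, if_neg (h a (by simp))]
    rw [this]
    exact ih (fun x hx => h x (by simp [hx]))

theorem pvFoldDec (offset : Int) :
    ∀ (t : List ℕ) (p b : Int), t.Pairwise (fun a c => pvD offset c < pvD offset a) →
    (∀ x ∈ t, pvD offset x < b) →
    List.foldl (pvStep offset) (some p, some b) t =
      (match t.getLast? with
       | none => (some p, some b)
       | some z => (some (z : Int), some (pvD offset z))) := by
  intro t
  induction t with
  | nil => intro p b _ _; rfl
  | cons a t' ih =>
    intro p b hpw hlt
    rcases List.pairwise_cons.mp hpw with ⟨ha, ht⟩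
    rw [List.foldl_cons]
    have hstep : pvStep offset (some p, some b) a = (some (a : Int), some (pvD offset a)) := by
      simp [pvStep, if_pos (hlt a (by simp))]
    rw [hstep]
    cases t' with
    | nil => rfl
    | cons c t'' =>
      rw [List.getLast?_cons_cons]
      exact ih (a : Int) (pvD offset a) ht (fun x hx => ha x hx)

theorem pvGetLastMax (l : List ℕ) (hl : l.Pairwise (· < ·)) (j : ℕ) (hj : j ∈ l)
    (hmax : ∀ k ∈ l, k ≤ j) : l.getLast? = some j := by
  induction l with
  | nil => cases hj
  | cons a t ih =>
    rcases List.pairwise_cons.mp hl with ⟨ha, ht⟩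
    cases t with
    | nil =>
      simp at hj ⊢; omega
    | cons b t' =>
      rw [List.getLast?_cons_cons]
      apply ih ht
      · rcases List.mem_cons.mp hj with rfl | hj
        · exact absurd (hmax b (by simp)) (by have := ha b (by simp); omega)
        · simpa using hj
      · intro k hk; exact hmax k (by simp [hk])

theorem pvHeadMin (l : List ℕ) (hl : l.Pairwise (· < ·)) (j : ℕ) (hj : j ∈ l)
    (hmin : ∀ k ∈ l, j ≤ k) : l.head? = some j := by
  cases l with
  | nil => cases hj
  | cons a t =>
    rcases List.pairwise_cons.mp hl with ⟨ha, -⟩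
    rcases List.mem_cons.mp hj with rfl | hj
    · rfl
    · have := ha j hj
      have := hmin a (by simp)
      omega

theorem pvFilterSplit (l : List ℕ) (m : Int) (hl : l.Pairwise (· < ·)) :
    l = l.filter (fun (k : ℕ) => decide ((k : ℤ) ≤ m)) ++ l.filter (fun (k : ℕ) => decide (m < (k : ℤ))) := by
  induction l with
  | nil => rfl
  | cons a t ih =>
    rcases List.pairwise_cons.mp hl with ⟨ha, ht⟩
    by_cases hc : (a : ℤ) ≤ m
    · simp only [List.filter_cons, decide_eq_true_eq, if_pos hc, if_neg (not_lt.mpr hc)]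
      rw [List.cons_append]
      exact congrArg (a :: ·) (ih ht)
    · have hgt : m < (a : ℤ) := lt_of_not_ge hc
      have h1 : t.filter (fun (k : ℕ) => decide ((k : ℤ) ≤ m)) = [] := by
        rw [List.filter_eq_nil_iff]
        intro k hk
        have := ha k hk
        simp only [decide_eq_true_eq]; omega
      simp only [List.filter_cons, decide_eq_true_eq, if_neg hc, if_pos hgt, h1]
      have h2 := ih ht
      rw [h1] at h2
      simpa using congrArg (a :: ·) h2

theorem pvDecAux (offset sI eI mid : Int) (a b : ℕ) (hmid : mid = max sI (min offset eI))
    (ha1 : sI ≤ (a : Int)) (ham : (a : Int) ≤ mid) (hb1 : sI ≤ (b : Int)) (hbm : (b : Int) ≤ mid)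
    (hab : a < b) : |(b : Int) - offset| < |(a : Int) - offset| := by
  rcases (show mid ≤ offset ∨ mid = sI by omega) with h | h
  · rw [abs_of_nonpos (by omega), abs_of_nonpos (by omega)]; omega
  · exfalso; omega

theorem pvIncAux (offset sI eI mid L : Int) (a b : ℕ) (hmid : mid = max sI (min offset eI))
    (hL : 1 ≤ L) (ham : mid < (a : Int)) (ha2 : (a : Int) + L ≤ eI) (hbm : mid < (b : Int))
    (hb2 : (b : Int) + L ≤ eI) (hab : a < b) : |(a : Int) - offset| < |(b : Int) - offset| := by
  have hom : offset ≤ mid := by omega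
  rw [abs_of_nonneg (by omega), abs_of_nonneg (by omega)]; omega

-- the main fuzzy-branch equality
theorem pvFuzzyMain (doc old new : String) (offset window : Int) (hsub : old.toList ≠ [])
    (hw : 0 ≤ offset + window)
    (hfound : PySem.Str.isIn old (PySem.Str.slice doc (some (max 0 (offset - window)))
      (some (min (PySem.Str.len doc) (offset + window)))) = true) :
    (match pvFuzzyLoop doc old (min (PySem.Str.len doc) (offset + window)) offset
        ((PySem.Str.len doc + 1 - max 0 (offset - window)).toNat)
        (max 0 (offset - window)) none none with
      | some bp => pvExactApply doc bp old new
      | none => "") =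
    (let start := max 0 (offset - window)
     let stop := max 0 (min (PySem.Str.len doc) (offset + window))
     let mid := max start (min offset stop)
     let left := PySem.Str.rfindFrom doc old start (some (min stop (mid + PySem.Str.len old)))
     let right := PySem.Str.findFrom doc old mid (some stop)
     if left = -1 ∧ right = -1 then ""
     else
       pvExactApply doc
         (if right = -1 ∨ (¬ left = -1 ∧ offset - left ≤ right - offset) then left else right)
         old new) := by
  have hL : 1 ≤ old.toList.length := List.length_pos_iff.mpr hsub
  dsimp only
  simp only [PySem.Str.len_eq, PySem.Str.findFrom_eq, PySem.Str.rfindFrom_eq,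
    PySem.Str.isIn_eq, PySem.Str.toList_slice, PySem.Chars.slice_eq_listSlice] at hfound ⊢
  set sI := max (0:Int) (offset - window) with hsIdef
  set eI := min ((doc.toList.length : Int)) (offset + window) with heIdef
  have he : (0:Int) ≤ eI := by omega
  have hen : eI ≤ (doc.toList.length : Int) := by omega
  have hstop : max (0:Int) eI = eI := by omega
  rw [hstop]
  set mid := max sI (min offset eI) with hmiddef
  set e2 := min eI (mid + (old.toList.length : Int)) with he2def
  have hs0 : (0:Int) ≤ sI := by omega
  have hm0 : (0:Int) ≤ mid := by omega
  have hsm : sI ≤ mid := by omega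
  have he20 : (0:Int) ≤ e2 := by omega
  have he2n : e2 ≤ (doc.toList.length : Int) := by omega
  set S := pvOccs doc.toList old.toList eI sI with hSdef
  have hSsort : S.Pairwise (· < ·) := pvOccs_sorted _ _ _ _
  have hSmem : ∀ k : ℕ, k ∈ S ↔
      (sI ≤ (k : Int) ∧ (k : Int) + old.toList.length ≤ eI ∧ old.toList <+: doc.toList.drop k) :=
    fun k => pvMem_occs doc.toList old.toList eI sI hL hen k
  -- the window slice contains old, so S is nonempty
  rw [PySem.List.slice_toNat doc.toList hs0 he, ← List.drop_take, PySem.Chars.isIn_iff_infix,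
    pvInfixRegion doc.toList old.toList hsub] at hfound
  obtain ⟨k₀, hk₀1, hk₀2, hk₀3⟩ := hfound
  have hk₀S : k₀ ∈ S := (hSmem k₀).mpr ⟨by omega, by omega, hk₀3⟩
  have hSne : S ≠ [] := List.ne_nil_of_mem hk₀S
  -- A's loop as a fold over S
  rw [pvLoop_eq_fold doc old eI offset hsub he hen
    (((doc.toList.length : Int) + 1 - sI).toNat) sI le_rfl hs0 none none]
  set lefts := S.filter (fun (k : ℕ) => decide ((k : Int) ≤ mid)) with hleftsdef
  set rights := S.filter (fun (k : ℕ) => decide (mid < (k : Int))) with hrightsdef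
  have hleftsS : ∀ k : ℕ, k ∈ lefts ↔ (k ∈ S ∧ (k : Int) ≤ mid) := by
    intro k; rw [hleftsdef, List.mem_filter]; simp
  have hrightsS : ∀ k : ℕ, k ∈ rights ↔ (k ∈ S ∧ mid < (k : Int)) := by
    intro k; rw [hrightsdef, List.mem_filter]; simp
  have hsplit : S = lefts ++ rights := pvFilterSplit S mid hSsort
  rw [show List.foldl (pvStep offset) (none, none) S
      = List.foldl (pvStep offset) (List.foldl (pvStep offset) (none, none) lefts) rights by
    rw [← List.foldl_append, ← hsplit]]
  set lB := PySem.Chars.rfindFrom doc.toList old.toList sI (some e2) with hlBdef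
  set rB := PySem.Chars.findFrom doc.toList old.toList mid (some eI) with hrBdef
  -- left candidate characterization
  have hleft : (lB = -1 ∧ lefts = []) ∨
      (∃ l₀ : ℕ, lB = (l₀ : Int) ∧ l₀ ∈ lefts ∧ (∀ k ∈ lefts, k ≤ l₀) ∧
        lefts.getLast? = some l₀) := by
    by_cases hlB : lB = -1
    · left
      refine ⟨hlB, ?_⟩
      rw [hleftsdef, List.filter_eq_nil_iff]
      intro k hk
      simp only [decide_eq_true_eq]
      intro hkm
      obtain ⟨h1, h2, h3⟩ := (hSmem k).mp hk
      have hall := (pvRF_neg_one doc.toList old.toList sI e2 hsub hs0 he20 he2n).mp hlB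
      exact hall k h1 (by omega) h3
    · right
      obtain ⟨l₀, h1, h2, h3, h4, h5⟩ :=
        pvRF_spec doc.toList old.toList sI e2 hsub hs0 he20 he2n hlB
      have hmemS : l₀ ∈ S := (hSmem l₀).mpr ⟨h2, by omega, h4⟩
      have hmemL : l₀ ∈ lefts := (hleftsS l₀).mpr ⟨hmemS, by omega⟩
      have hmax : ∀ k ∈ lefts, k ≤ l₀ := by
        intro k hk
        obtain ⟨hkS, hkm⟩ := (hleftsS k).mp hk
        obtain ⟨g1, g2, g3⟩ := (hSmem k).mp hkS
        by_contra hc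
        exact h5 k (by omega) ⟨g1, by omega, g3⟩
      exact ⟨l₀, h1, hmemL, hmax,
        pvGetLastMax lefts (List.Pairwise.sublist List.filter_sublist hSsort) l₀ hmemL hmax⟩
  -- right candidate characterization
  have hright : (rB = -1 ∧ rights = []) ∨
      (∃ r₀ : ℕ, rB = (r₀ : Int) ∧ mid ≤ (r₀ : Int) ∧ r₀ ∈ S ∧
        ∀ k ∈ S, mid ≤ (k : Int) → r₀ ≤ k) := by
    by_cases hrB : rB = -1
    · left
      refine ⟨hrB, ?_⟩
      rw [hrightsdef, List.filter_eq_nil_iff]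
      intro k hk
      simp only [decide_eq_true_eq]
      intro hkm
      obtain ⟨h1, h2, h3⟩ := (hSmem k).mp hk
      have hall := (pvFF_neg_one doc.toList old.toList mid eI hsub hm0 he hen).mp hrB
      exact hall k (by omega) h2 h3
    · right
      obtain ⟨r₀, h1, h2, h3, h4, h5⟩ :=
        pvFF_spec doc.toList old.toList mid eI hsub hm0 he hen hrB
      refine ⟨r₀, h1, h2, (hSmem r₀).mpr ⟨by omega, h3, h4⟩, ?_⟩
      intro k hk hkm
      obtain ⟨g1, g2, g3⟩ := (hSmem k).mp hk
      by_contra hc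
      exact h5 k hkm (by omega) ⟨g2, g3⟩
  -- pairwise distance facts
  have hdec : lefts.Pairwise (fun a b => pvD offset b < pvD offset a) := by
    have h1 : lefts.Pairwise (· < ·) := List.Pairwise.sublist List.filter_sublist hSsort
    refine (List.Pairwise.and_mem.mp h1).imp ?_
    rintro a b ⟨hma, hmb, hab⟩
    obtain ⟨haS, ham⟩ := (hleftsS a).mp hma
    obtain ⟨ha1, ha2, -⟩ := (hSmem a).mp haS
    obtain ⟨hbS, hbm⟩ := (hleftsS b).mp hmb
    obtain ⟨hb1, hb2, -⟩ := (hSmem b).mp hbS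
    exact pvDecAux offset sI eI mid a b hmiddef ha1 ham hb1 hbm hab
  have hinc : rights.Pairwise (fun a b => pvD offset a < pvD offset b) := by
    have h1 : rights.Pairwise (· < ·) := List.Pairwise.sublist List.filter_sublist hSsort
    refine (List.Pairwise.and_mem.mp h1).imp ?_
    rintro a b ⟨hma, hmb, hab⟩
    obtain ⟨haS, ham⟩ := (hrightsS a).mp hma
    obtain ⟨ha1, ha2, -⟩ := (hSmem a).mp haS
    obtain ⟨hbS, hbm⟩ := (hrightsS b).mp hmb
    obtain ⟨hb1, hb2, -⟩ := (hSmem b).mp hbS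
    exact pvIncAux offset sI eI mid (old.toList.length : Int) a b hmiddef (by omega) ham ha2 hbm hb2 hab
  -- main case analysis
  rcases hleft with ⟨hlB, hlnil⟩ | ⟨l₀, hlB, hl₀L, hl₀max, hl₀last⟩
  · -- no left candidate
    rw [hlnil, List.foldl_nil]
    rcases hright with ⟨hrB, hrnil⟩ | ⟨r₀, hrB, hr₀mid, hr₀S, hr₀min⟩
    · exfalso; rw [hsplit, hlnil, hrnil] at hSne; exact hSne rfl
    · cases hrt : rights with
      | nil => exfalso; rw [hsplit, hlnil, hrt] at hSne; exact hSne rfl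
      | cons r₁ t =>
        have hr₀r : mid < (r₀ : Int) := by
          rcases lt_or_eq_of_le hr₀mid with h | h
          · exact h
          · exfalso
            have : r₀ ∈ lefts := (hleftsS r₀).mpr ⟨hr₀S, by omega⟩
            rw [hlnil] at this; exact absurd this (List.not_mem_nil)
        have hr₀R : r₀ ∈ rights := (hrightsS r₀).mpr ⟨hr₀S, hr₀r⟩
        have hhead : rights.head? = some r₀ := by
          apply pvHeadMin rights (List.Pairwise.sublist List.filter_sublist hSsort) r₀ hr₀R
          intro k hk
          obtain ⟨hkS, hkm⟩ := (hrightsS k).mp hk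
          exact hr₀min k hkS (by omega)
        rw [hrt] at hhead
        have hr₁ : r₀ = r₁ := by simpa using hhead.symm
        rw [List.foldl_cons]
        have hstep : pvStep offset (none, none) r₁ = (some (r₁ : Int), some (pvD offset r₁)) := rfl
        rw [hstep, pvFoldNoop offset t (r₁ : Int) (pvD offset r₁) ?hnp]
        case hnp =>
          rw [hrt] at hinc
          obtain ⟨hh, -⟩ := List.pairwise_cons.mp hinc
          intro x hx
          exact not_lt.mpr (le_of_lt (hh x hx))
        dsimp only
        rw [if_neg (by rw [hrB]; omega)]
        rw [if_neg (by
          rintro (hA | hB)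
          · rw [hrB] at hA; omega
          · exact hB.1 hlB), hrB, hr₁]
  · -- left candidate l₀ exists
    have hfoldlefts : List.foldl (pvStep offset) (none, none) lefts
        = (some (l₀ : Int), some (pvD offset l₀)) := by
      cases hlf : lefts with
      | nil => rw [hlf] at hl₀last; simp at hl₀last
      | cons a ls =>
        rw [List.foldl_cons]
        have hstep : pvStep offset (none, none) a = (some (a : Int), some (pvD offset a)) := rfl
        rw [hstep]
        rw [hlf] at hdec
        obtain ⟨hh, ht⟩ := List.pairwise_cons.mp hdec
        rw [pvFoldDec offset ls (a : Int) (pvD offset a) ht hh]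
        cases hgl : ls.getLast? with
        | none =>
          have hls : ls = [] := by simpa using hgl
          rw [hls] at hlf
          rw [hlf] at hl₀last
          simp only [List.getLast?_singleton, Option.some.injEq] at hl₀last
          rw [hl₀last]
        | some z =>
          have : lefts.getLast? = some z := by
            rw [hlf]
            cases ls with
            | nil => simp at hgl
            | cons c t' => rw [List.getLast?_cons_cons]; exact hgl
          rw [hl₀last] at this
          have hz : l₀ = z := by simpa using this
          rw [← hz]
    rw [hfoldlefts]
    rcases hright with ⟨hrB, hrnil⟩ | ⟨r₀, hrB, hr₀mid, hr₀S, hr₀min⟩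
    · rw [hrnil, List.foldl_nil]
      dsimp only
      rw [if_neg (by rw [hlB]; omega)]
      rw [if_pos (Or.inl hrB), hlB]
    · obtain ⟨hl₀S, hl₀mid⟩ := (hleftsS l₀).mp hl₀L
      obtain ⟨hl₀1, hl₀2, -⟩ := (hSmem l₀).mp hl₀S
      cases hrt : rights with
      | nil =>
        have hr₀eq : (r₀ : Int) = mid := by
          rcases lt_or_eq_of_le hr₀mid with h | h
          · exfalso
            have : r₀ ∈ rights := (hrightsS r₀).mpr ⟨hr₀S, h⟩
            rw [hrt] at this; exact absurd this (List.not_mem_nil)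
          · omega
        have hr₀lefts : r₀ ∈ lefts := (hleftsS r₀).mpr ⟨hr₀S, by omega⟩
        have : r₀ = l₀ := le_antisymm (hl₀max r₀ hr₀lefts) (by omega)
        rw [List.foldl_nil]
        dsimp only
        rw [if_neg (by rw [hlB]; omega)]
        rw [hlB, hrB, this, ite_self]
      | cons r₁ t =>
        obtain ⟨hr₁S, hr₁mid⟩ := (hrightsS r₁).mp (by rw [hrt]; exact List.mem_cons_self)
        obtain ⟨hr₁1, hr₁2, -⟩ := (hSmem r₁).mp hr₁S
        have hom : offset ≤ mid := by omega
        rw [hrt] at hinc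
        obtain ⟨hh, -⟩ := List.pairwise_cons.mp hinc
        rw [List.foldl_cons]
        have habsr : pvD offset r₁ = (r₁ : Int) - offset := by
          show |(r₁ : Int) - offset| = _
          rw [abs_of_nonneg (by omega)]
        by_cases hmidc : (r₀ : Int) = mid
        · -- the right search found mid itself, which is also the left candidate
          have hr₀lefts : r₀ ∈ lefts := (hleftsS r₀).mpr ⟨hr₀S, by omega⟩
          have hrl : r₀ = l₀ := le_antisymm (hl₀max r₀ hr₀lefts) (by omega)
          have hl₀eq : (l₀ : Int) = mid := by omega
          have habsl : pvD offset l₀ = mid - offset := by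
            show |(l₀ : Int) - offset| = _
            rw [abs_of_nonneg (by omega)]
            omega
          have hncmp : ¬ pvD offset r₁ < pvD offset l₀ := by
            rw [habsr, habsl]; omega
          have hstep : pvStep offset (some (l₀ : Int), some (pvD offset l₀)) r₁
              = (some (l₀ : Int), some (pvD offset l₀)) := by
            simp [pvStep, if_neg hncmp]
          rw [hstep, pvFoldNoop offset t (l₀ : Int) (pvD offset l₀) ?hnp2]
          case hnp2 =>
            intro x hx
            have h1 := hh x hx
            rw [habsr] at h1
            rw [habsl]
            omega
          dsimp only
          rw [if_neg (by rw [hlB]; omega)]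
          rw [if_pos (Or.inr ⟨by rw [hlB]; omega, by rw [hlB, hrB]; omega⟩), hlB]
        · -- the right candidate is r₁, strictly right of mid
          have hr₀r : mid < (r₀ : Int) := lt_of_le_of_ne hr₀mid (fun hc => hmidc hc.symm)
          have hr₀R : r₀ ∈ rights := (hrightsS r₀).mpr ⟨hr₀S, hr₀r⟩
          have hhead : rights.head? = some r₀ := by
            apply pvHeadMin rights (List.Pairwise.sublist List.filter_sublist hSsort) r₀ hr₀R
            intro k hk
            obtain ⟨hkS, hkm⟩ := (hrightsS k).mp hk
            exact hr₀min k hkS (by omega)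
          rw [hrt] at hhead
          have hr₁eq : r₀ = r₁ := by simpa using hhead.symm
          rcases abs_cases ((l₀ : Int) - offset) with ⟨hA, hB⟩ | ⟨hA, hB⟩ <;>
          · have habsl : pvD offset l₀ = |(l₀ : Int) - offset| := rfl
            rw [hA] at habsl
            by_cases hcmp : pvD offset r₁ < pvD offset l₀
            · have hstep : pvStep offset (some (l₀ : Int), some (pvD offset l₀)) r₁
                  = (some (r₁ : Int), some (pvD offset r₁)) := by
                simp [pvStep, if_pos hcmp]
              rw [hstep, pvFoldNoop offset t (r₁ : Int) (pvD offset r₁)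
                (fun x hx => not_lt.mpr (le_of_lt (hh x hx)))]
              dsimp only
              rw [if_neg (by rw [hlB]; omega)]
              rw [if_neg (by
                rintro (hA | hB)
                · rw [hrB] at hA; omega
                · rw [hlB, hrB] at hB
                  rw [habsr, habsl] at hcmp
                  omega), hrB, hr₁eq]
            · have hstep : pvStep offset (some (l₀ : Int), some (pvD offset l₀)) r₁
                  = (some (l₀ : Int), some (pvD offset l₀)) := by
                simp [pvStep, if_neg hcmp]
              rw [hstep, pvFoldNoop offset t (l₀ : Int) (pvD offset l₀) ?_]
              · dsimp only
                rw [if_neg (by rw [hlB]; omega)]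
                rw [if_pos (Or.inr ⟨by rw [hlB]; omega, by
                  rw [hlB, hrB, hr₁eq]
                  rw [habsr, habsl] at hcmp
                  omega⟩), hlB]
              · intro x hx
                have h1 := hh x hx
                rw [habsr] at h1
                have h2 : pvD offset x = (x : Int) - offset := by
                  show |(x : Int) - offset| = _
                  have hxR : x ∈ t := hx
                  rw [abs_of_nonneg (by
                    obtain ⟨hxS, hxm⟩ := (hrightsS x).mp (by rw [hrt]; exact List.mem_cons_of_mem _ hx)
                    omega)]
                rw [h2]
                rw [habsr, habsl] at hcmp
                omega

-- ===== VERDICT (by name: the statement is the Claim_ definition above) =====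
theorem apply_event_fuzzy_text_py_spec : Claim_equal_apply_event_fuzzy_text_py := by
  intro doc offset old new window _hdom hpre
  unfold Spec_apply_event_fuzzy_text_py
  unfold apply_event_fuzzy_text_py apply_event_fuzzy_text_py_alt
  by_cases h0 : old = ""
  · rw [if_pos h0, if_pos h0]
  · rw [if_neg h0, if_neg h0]
    by_cases h1 : PySem.Str.slice doc (some offset) (some (offset + PySem.Str.len old)) = old
    · rw [if_pos h1, if_pos h1]
    · rw [if_neg h1, if_neg h1]
      rcases hpre with h | h | ⟨hw, hfound⟩
      · exact absurd h h0
      · exact absurd h h1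
      · have hsub : old.toList ≠ [] := fun hc => h0 (String.toList_eq_nil_iff.mp hc)
        exact pvFuzzyMain doc old new offset window hsub hw hfound
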